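-- pv_equiv track=rewrite | github.com/Chandrakanthck/PassForge | PassForge.py | generate_all_passwords
-- ===== SOURCE A (Python) =====
-- import itertools
--
-- def generate_all_passwords(base_word, min_length, max_length, special_chars, allow_slice):
--     """Generates all possible passwords based on given rules."""
--     passwords = set()
--     word_variations = [base_word[:i] for i in range(1, len(base_word) + 1)] if allow_slice else [base_word]
--
--     for word in word_variations:
--         for length in range(min_length, max_length + 1):
--             if len(word) >= length:
--                 passwords.add(word[:length])  # Direct slice
--             else:
--                 extras = itertools.product(special_chars or "0123456789", repeat=length - len(word))
--                 for extra in extras: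
--                     passwords.add(word + ''.join(extra))
--
--     return sorted(passwords)
-- ===== SOURCE B (Python) =====
-- def generate_all_passwords(base_word, min_length, max_length, special_chars, allow_slice):
--     """Generates all possible passwords (BFS layer growth: each word's extensions are
--     grown one character per length from a shared frontier instead of regenerating a
--     full character product for every target length)."""
--     if min_length > max_length:
--         return []
--     charset = special_chars or "0123456789"
--     words = [base_word[:i] for i in range(1, len(base_word) + 1)] if allow_slice else [base_word]
--     out = set()
--     for word in words:
--         for length in range(min_length, min(max_length, len(word)) + 1):
--             out.add(word[:length])
--         frontier = [word]
--         for length in range(len(word) + 1, max_length + 1):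
--             frontier = [p + c for p in frontier for c in charset]
--             if length >= min_length:
--                 out.update(frontier)
--     return sorted(out)
-- ===== Notes on version B (the rewrite author's own statement) =====
-- stated objective: alternative
-- what changed: Per word, the slice lengths are emitted by one clamped range and the itertools.product call disappears: extensions are produced by a BFS frontier grown one character per target length (frontier = [p+c ...]) and flushed into the set at each in-range length, reusing each layer for the next instead of regenerating the full product per length.
import Mathlib
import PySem

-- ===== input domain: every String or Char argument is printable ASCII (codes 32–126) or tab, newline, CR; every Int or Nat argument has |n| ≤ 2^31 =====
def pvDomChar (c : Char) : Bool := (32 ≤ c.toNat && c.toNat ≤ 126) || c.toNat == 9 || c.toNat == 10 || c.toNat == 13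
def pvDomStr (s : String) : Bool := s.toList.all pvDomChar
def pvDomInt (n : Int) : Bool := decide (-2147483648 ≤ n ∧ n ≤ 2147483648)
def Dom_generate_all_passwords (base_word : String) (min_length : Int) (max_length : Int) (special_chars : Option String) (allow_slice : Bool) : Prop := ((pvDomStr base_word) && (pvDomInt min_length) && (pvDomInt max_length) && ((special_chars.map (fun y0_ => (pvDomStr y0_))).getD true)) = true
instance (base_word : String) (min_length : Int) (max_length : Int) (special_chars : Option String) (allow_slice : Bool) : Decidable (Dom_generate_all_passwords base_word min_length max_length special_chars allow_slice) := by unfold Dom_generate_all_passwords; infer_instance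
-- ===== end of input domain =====

-- B replaces the per-(word,length) itertools.product enumeration by a BFS layer growth:
-- each word's extension frontier is grown one character per target length and flushed
-- into the set, so the product call disappears; the sorted-set result is identical.

-- ===== PORT A =====
-- 'special_chars or "0123456789"' (None and "" are falsy); used verbatim by both Pythons
def pvCharset : Option String → String
  | none => "0123456789"
  | some s => if s = "" then "0123456789" else s

-- itertools.product(cs, repeat=n), tuples as their character lists (last position varies fastest)
def pvProdA (cs : List Char) : Nat → List (List Char)
  | 0 => [[]]
  | n+1 => (pvProdA cs n).flatMap (fun p => cs.map (fun c => p ++ [c]))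

-- 'word + ''.join(extra)' is rendered as PySem.Str.join "" [word, String.ofList extra]
-- (exact: concatenation of the two pieces).
def generate_all_passwords (base_word : String) (min_length : Int) (max_length : Int) (special_chars : Option String) (allow_slice : Bool) : List String :=
  let word_variations : List String :=
    if allow_slice then
      (PySem.List.pyRange 1 (PySem.Str.len base_word + 1) 1).map
        (fun i => PySem.Str.slice base_word none (some i))
    else [base_word]
  let passwords : PySem.Set String :=
    word_variations.foldl (fun s word =>
      (PySem.List.pyRange min_length (max_length + 1) 1).foldl (fun s length =>
        if PySem.Str.len word ≥ length then
          PySem.Set.add s (PySem.Str.slice word none (some length))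
        else
          (pvProdA (pvCharset special_chars).toList (length - PySem.Str.len word).toNat).foldl
            (fun s extra => PySem.Set.add s (PySem.Str.join "" [word, String.ofList extra])) s)
        s)
      PySem.Set.empty
  PySem.List.sorted passwords (fun x => x) false

-- ===== PORT B =====
def generate_all_passwords_alt (base_word : String) (min_length : Int) (max_length : Int) (special_chars : Option String) (allow_slice : Bool) : List String :=
  if min_length > max_length then [] else
  let charset := pvCharset special_chars
  let words : List String :=
    if allow_slice then
      (PySem.List.pyRange 1 (PySem.Str.len base_word + 1) 1).map
        (fun i => PySem.Str.slice base_word none (some i))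
    else [base_word]
  let out : PySem.Set String :=
    words.foldl (fun s word =>
      let s := (PySem.List.pyRange min_length (min max_length (PySem.Str.len word) + 1) 1).foldl
        (fun s length => PySem.Set.add s (PySem.Str.slice word none (some length))) s
      ((PySem.List.pyRange (PySem.Str.len word + 1) (max_length + 1) 1).foldl
        (fun (p : PySem.Set String × List String) length =>
          let frontier := p.2.flatMap (fun q => charset.toList.map (fun c => q ++ c.toString))
          (if length ≥ min_length then PySem.Set.update p.1 frontier else p.1, frontier))
        (s, [word])).1)
      PySem.Set.empty
  PySem.List.sorted out (fun x => x) false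

-- ===== PRECONDITION & SPEC =====
def Spec_generate_all_passwords (base_word : String) (min_length : Int) (max_length : Int) (special_chars : Option String) (allow_slice : Bool) (out : List String) : Prop := out = generate_all_passwords_alt base_word min_length max_length special_chars allow_slice
instance (base_word : String) (min_length : Int) (max_length : Int) (special_chars : Option String) (allow_slice : Bool) (out : List String) : Decidable (Spec_generate_all_passwords base_word min_length max_length special_chars allow_slice out) := by unfold Spec_generate_all_passwords; infer_instance

-- ===== CLAIM (what is proved, stated in full; the proofs are below) =====
def Claim_equal_generate_all_passwords : Prop := ∀ (base_word : String) (min_length : Int) (max_length : Int) (special_chars : Option String) (allow_slice : Bool), Dom_generate_all_passwords base_word min_length max_length special_chars allow_slice → Spec_generate_all_passwords base_word min_length max_length special_chars allow_slice (generate_all_passwords base_word min_length max_length special_chars allow_slice)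

-- ===== LEMMAS AND PROOFS =====

-- the BFS layers of B, as a proof-side abbreviation: pvExt cs w d = all w+s with s a
-- d-character string over cs (pvExt (d+1) is literally one step of B's frontier update)
def pvExt (cs : List Char) (w : String) : Nat → List String
  | 0 => [w]
  | d+1 => (pvExt cs w d).flatMap (fun q => cs.map (fun c => q ++ c.toString))

theorem join_pair (a b : String) : PySem.Str.join "" [a, b] = a ++ b := by
  apply String.toList_inj.mp
  simp [PySem.Str.join, PySem.Chars.join, List.intercalate]

-- A's product tuples enumerate exactly the length-n words over cs
theorem mem_pvProdA (cs : List Char) (n : Nat) (t : List Char) :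
    t ∈ pvProdA cs n ↔ t.length = n ∧ ∀ c ∈ t, c ∈ cs := by
  induction n generalizing t with
  | zero =>
    simp [pvProdA, List.length_eq_zero_iff]
    rintro rfl c hc
    simp at hc
  | succ n ih =>
    simp only [pvProdA, List.mem_flatMap, List.mem_map]
    constructor
    · rintro ⟨p, hp, c, hc, rfl⟩
      rcases ih p |>.mp hp with ⟨hl, hall⟩
      refine ⟨by simp [hl], ?_⟩
      intro d hd
      rcases List.mem_append.mp hd with h | h
      · exact hall d h
      · simp at h; exact h ▸ hc
    · rintro ⟨hl, hall⟩
      rcases List.eq_nil_or_concat t with rfl | ⟨p, c, rfl⟩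
      · simp at hl
      · refine ⟨p, (ih p).mpr ⟨by simpa using hl, fun d hd => hall d (by simp [hd])⟩,
          c, hall c (by simp), (by simp : p ++ [c] = List.concat p c)⟩

-- B's d-th frontier layer holds exactly the d-character extensions of w
theorem mem_pvExt (cs : List Char) (w : String) (d : Nat) (y : String) :
    y ∈ pvExt cs w d ↔ ∃ t : List Char, t.length = d ∧ (∀ c ∈ t, c ∈ cs) ∧
      y = w ++ String.ofList t := by
  induction d generalizing y with
  | zero =>
    constructor
    · intro h
      simp [pvExt] at h
      refine ⟨[], rfl, by simp, ?_⟩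
      apply String.toList_inj.mp
      simp [h]
    · rintro ⟨t, ht, _, rfl⟩
      have : t = [] := List.length_eq_zero_iff.mp ht
      subst this
      have : w ++ String.ofList [] = w := by
        apply String.toList_inj.mp; simp
      simp [pvExt, this]
    | succ d ih =>
    simp only [pvExt, List.mem_flatMap, List.mem_map]
    constructor
    · rintro ⟨q, hq, c, hc, rfl⟩
      rcases (ih q).mp hq with ⟨t, hl, hall, rfl⟩
      refine ⟨t ++ [c], by simp [hl], ?_, ?_⟩
      · intro d' hd'
        rcases List.mem_append.mp hd' with h | h
        · exact hall d' h
        · simp at h; exact h ▸ hc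
      · apply String.toList_inj.mp; simp
    · rintro ⟨t, hl, hall, rfl⟩
      rcases List.eq_nil_or_concat t with rfl | ⟨t', c, rfl⟩
      · simp at hl
      · refine ⟨w ++ String.ofList t', (ih _).mpr
          ⟨t', by simpa using hl, fun d' hd' => hall d' (by simp [hd']), rfl⟩,
          c, hall c (by simp), ?_⟩
        apply String.toList_inj.mp; simp

-- generic: membership in a fold whose body adds exactly the elements satisfying P x ·
theorem mem_foldl_body {α β : Type} [BEq β] [LawfulBEq β] (l : List α)
    (f : PySem.Set β → α → PySem.Set β) (P : α → β → Prop)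
    (hf : ∀ s x y, x ∈ l → (y ∈ f s x ↔ y ∈ s ∨ P x y)) (s : PySem.Set β) (y : β) :
    y ∈ l.foldl f s ↔ y ∈ s ∨ ∃ x ∈ l, P x y := by
  induction l generalizing s with
  | nil => simp
  | cons a l ih =>
    simp only [List.foldl_cons]
    rw [ih (fun s x y hx => hf s x y (by simp [hx]))]
    rw [hf s a y (by simp)]
    constructor
    · rintro ((h | h) | ⟨x, hx, h⟩)
      · exact Or.inl h
      · exact Or.inr ⟨a, by simp, h⟩
      · exact Or.inr ⟨x, by simp [hx], h⟩
    · rintro (h | ⟨x, hx, h⟩)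
      · exact Or.inl (Or.inl h)
      · rcases List.mem_cons.mp hx with rfl | hx
        · exact Or.inl (Or.inr h)
        · exact Or.inr ⟨x, hx, h⟩

theorem nodup_foldl_body {α β : Type} (l : List α) (f : PySem.Set β → α → PySem.Set β)
    (hf : ∀ s x, List.Nodup s → List.Nodup (f s x)) (s : PySem.Set β)
    (hs : List.Nodup s) : List.Nodup (l.foldl f s) := by
  induction l generalizing s with
  | nil => exact hs
  | cons a l ih => exact ih (f s a) (hf s a hs)

theorem nodup_foldl_fst {α β γ : Type} (l : List α) (f : (List β × γ) → α → (List β × γ))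
    (hf : ∀ p x, List.Nodup p.1 → List.Nodup ((f p x).1)) :
    ∀ p : List β × γ, List.Nodup p.1 → List.Nodup ((l.foldl f p).1) := by
  induction l with
  | nil => exact fun p hp => hp
  | cons a l ih => exact fun p hp => ih (f p a) (hf p a hp)

-- the elements a (word, length) cell contributes, common to both ports
def pvCell (cs : List Char) (word : String) (length : Int) (y : String) : Prop :=
  if length ≤ PySem.Str.len word then y = PySem.Str.slice word none (some length)
  else ∃ t : List Char, t.length = (length - PySem.Str.len word).toNat ∧ (∀ c ∈ t, c ∈ cs) ∧
    y = word ++ String.ofList t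

theorem mem_passwords_A (words : List String) (mn mx : Int) (sc : Option String) (y : String) :
    y ∈ words.foldl (fun s word =>
      (PySem.List.pyRange mn (mx + 1) 1).foldl (fun s length =>
        if PySem.Str.len word ≥ length then
          PySem.Set.add s (PySem.Str.slice word none (some length))
        else
          (pvProdA (pvCharset sc).toList (length - PySem.Str.len word).toNat).foldl
            (fun s extra => PySem.Set.add s (PySem.Str.join "" [word, String.ofList extra])) s)
        s) PySem.Set.empty
    ↔ ∃ w ∈ words, ∃ L ∈ PySem.List.pyRange mn (mx + 1) 1, pvCell (pvCharset sc).toList w L y := by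
  rw [mem_foldl_body (P := fun w y => ∃ L ∈ PySem.List.pyRange mn (mx + 1) 1,
      pvCell (pvCharset sc).toList w L y)]
  · simp [PySem.Set.empty]
  · intro s w y _
    rw [mem_foldl_body (P := fun L y => pvCell (pvCharset sc).toList w L y)]
    intro s' L y' _
    unfold pvCell
    by_cases h : L ≤ PySem.Str.len w
    · simp only [ge_iff_le, if_pos h, PySem.Set.mem_add]
    · simp only [ge_iff_le, if_neg h]
      rw [PySem.Set.mem_foldl_add]
      constructor
      · rintro (h' | ⟨t, ht, rfl⟩)
        · exact Or.inl h'
        · exact Or.inr ⟨t, ((mem_pvProdA _ _ t).mp ht).1, ((mem_pvProdA _ _ t).mp ht).2,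
            join_pair _ _⟩
      · rintro (h' | ⟨t, h1, h2, rfl⟩)
        · exact Or.inl h'
        · exact Or.inr ⟨t, (mem_pvProdA _ _ t).mpr ⟨h1, h2⟩, (join_pair _ _).symm⟩

-- B's frontier loop over a consecutive integer range, starting at layer d
theorem mem_frontier_fold (cs : List Char) (w : String) (mn : Int) :
    ∀ (k : Nat) (a b : Int) (d : Nat) (s : PySem.Set String) (y : String),
    k = (b - a).toNat → a = PySem.Str.len w + 1 + d →
    (y ∈ ((PySem.List.pyRange a b 1).foldl
        (fun (p : PySem.Set String × List String) length =>
          (if length ≥ mn then PySem.Set.update p.1 (p.2.flatMap (fun q => cs.map (fun c => q ++ c.toString))) else p.1,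
           p.2.flatMap (fun q => cs.map (fun c => q ++ c.toString))))
        (s, pvExt cs w d)).1
     ↔ y ∈ s ∨ ∃ L : Int, a ≤ L ∧ L < b ∧ mn ≤ L ∧ y ∈ pvExt cs w (d + (L - a).toNat + 1)) := by
  intro k
  induction k with
  | zero =>
    intro a b d s y hk ha
    rw [PySem.List.pyRange_one_eq_nil (by omega)]
    simp only [List.foldl_nil]
    constructor
    · exact Or.inl
    · rintro (h | ⟨L, h1, h2, _, _⟩)
      · exact h
      · omega
  | succ k ih =>
    intro a b d s y hk ha
    rw [PySem.List.pyRange_one_cons (by omega)]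
    simp only [List.foldl_cons]
    rw [show List.flatMap (fun q => List.map (fun c => q ++ c.toString) cs) (pvExt cs w d)
        = pvExt cs w (d+1) from rfl]
    rw [ih (a+1) b (d+1) _ y (by omega) (by omega)]
    by_cases hmn : a ≥ mn
    · rw [if_pos hmn, ]
      constructor
      · rintro (h | ⟨L, h1, h2, h3, h4⟩)
        · rcases (PySem.Set.mem_update _ _ _).mp h with h | h
          · exact Or.inl h
          · exact Or.inr ⟨a, le_refl a, by omega, hmn, by simpa using h⟩
        · refine Or.inr ⟨L, by omega, h2, h3, ?_⟩
          have : d + 1 + (L - (a + 1)).toNat + 1 = d + (L - a).toNat + 1 := by omega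
          rwa [this] at h4
      · rintro (h | ⟨L, h1, h2, h3, h4⟩)
        · exact Or.inl ((PySem.Set.mem_update _ _ _).mpr (Or.inl h))
        · by_cases hL : L = a
          · subst hL
            refine Or.inl ((PySem.Set.mem_update _ _ _).mpr (Or.inr ?_))
            simpa using h4
          · refine Or.inr ⟨L, by omega, h2, h3, ?_⟩
            have : d + 1 + (L - (a + 1)).toNat + 1 = d + (L - a).toNat + 1 := by omega
            rw [this]
            exact h4
    · rw [if_neg hmn]
      constructor
      · rintro (h | ⟨L, h1, h2, h3, h4⟩)
        · exact Or.inl h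
        · refine Or.inr ⟨L, by omega, h2, h3, ?_⟩
          have : d + 1 + (L - (a + 1)).toNat + 1 = d + (L - a).toNat + 1 := by omega
          rwa [this] at h4
      · rintro (h | ⟨L, h1, h2, h3, h4⟩)
        · exact Or.inl h
        · have hL : a + 1 ≤ L := by omega
          refine Or.inr ⟨L, hL, h2, h3, ?_⟩
          have : d + 1 + (L - (a + 1)).toNat + 1 = d + (L - a).toNat + 1 := by omega
          rw [this]
          exact h4

theorem mem_passwords_B (words : List String) (mn mx : Int) (cs : String) (y : String) :
    y ∈ words.foldl (fun s word =>
      let s := (PySem.List.pyRange mn (min mx (PySem.Str.len word) + 1) 1).foldl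
        (fun s length => PySem.Set.add s (PySem.Str.slice word none (some length))) s
      ((PySem.List.pyRange (PySem.Str.len word + 1) (mx + 1) 1).foldl
        (fun (p : PySem.Set String × List String) length =>
          let frontier := p.2.flatMap (fun q => cs.toList.map (fun c => q ++ c.toString))
          (if length ≥ mn then PySem.Set.update p.1 frontier else p.1, frontier))
        (s, [word])).1) PySem.Set.empty
    ↔ ∃ w ∈ words, ∃ L ∈ PySem.List.pyRange mn (mx + 1) 1, pvCell cs.toList w L y := by
  rw [mem_foldl_body (P := fun w y => ∃ L ∈ PySem.List.pyRange mn (mx + 1) 1,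
      pvCell cs.toList w L y)]
  · simp [PySem.Set.empty]
  · intro s w y _
    have hlen : (0:Int) ≤ PySem.Str.len w := by
      simp [PySem.Str.len_eq]
    have hfold := mem_frontier_fold cs.toList w mn
      ((mx + 1) - (PySem.Str.len w + 1)).toNat (PySem.Str.len w + 1) (mx + 1) 0
    have h0 : pvExt cs.toList w 0 = [w] := rfl
    rw [h0] at hfold
    simp only []
    rw [hfold _ y rfl (by omega)]
    rw [PySem.Set.mem_foldl_add]
    constructor
    · rintro ((h | ⟨L, hL, rfl⟩) | ⟨L, h1, h2, h3, h4⟩)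
      · exact Or.inl h
      · rcases (PySem.List.mem_pyRange_one).mp hL with ⟨hL1, hL2⟩
        refine Or.inr ⟨L, (PySem.List.mem_pyRange_one).mpr ⟨hL1, by omega⟩, ?_⟩
        unfold pvCell
        rw [if_pos (by omega)]
      · rcases (mem_pvExt _ _ _ _).mp h4 with ⟨t, ht1, ht2, rfl⟩
        refine Or.inr ⟨L, (PySem.List.mem_pyRange_one).mpr ⟨h3, h2⟩, ?_⟩
        unfold pvCell
        rw [if_neg (by omega)]
        exact ⟨t, by omega, ht2, rfl⟩
    · rintro (h | ⟨L, hL, hcell⟩)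
      · exact Or.inl (Or.inl h)
      · rcases (PySem.List.mem_pyRange_one).mp hL with ⟨hL1, hL2⟩
        unfold pvCell at hcell
        by_cases hc : L ≤ PySem.Str.len w
        · rw [if_pos hc] at hcell
          exact Or.inl (Or.inr ⟨L, (PySem.List.mem_pyRange_one).mpr ⟨hL1, by omega⟩,
            hcell⟩)
        · rw [if_neg hc] at hcell
          rcases hcell with ⟨t, ht1, ht2, rfl⟩
          refine Or.inr ⟨L, by omega, by omega, hL1, ?_⟩
          apply (mem_pvExt _ _ _ _).mpr
          exact ⟨t, by omega, ht2, rfl⟩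

-- ===== VERDICT (by name: the statement is the Claim_ definition above) =====
theorem generate_all_passwords_spec : Claim_equal_generate_all_passwords := by
  intro base_word min_length max_length special_chars allow_slice _
  unfold Spec_generate_all_passwords generate_all_passwords generate_all_passwords_alt
  by_cases hmm : min_length > max_length
  · rw [if_pos hmm]
    simp only [PySem.List.pyRange_one_eq_nil (show max_length + 1 ≤ min_length by omega),
      List.foldl_nil]
    rw [show ∀ (l : List String) (s : PySem.Set String), l.foldl (fun s _ => s) s = s from
      fun l => by induction l with | nil => intro s; rfl | cons a l ih => intro s; exact ih s]
    rfl
  rw [if_neg hmm]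
  simp only []
  apply (PySem.List.sorted_id_eq_sorted_id_iff_perm _ _).mpr
  apply (List.perm_ext_iff_of_nodup ?_ ?_).mpr
  · intro y
    rw [mem_passwords_A, mem_passwords_B]
  · apply nodup_foldl_body _ _ (fun s x hs => ?_) _ (by simp [PySem.Set.empty])
    apply nodup_foldl_body _ _ (fun s' x' hs' => ?_) _ hs
    split
    · exact PySem.Set.nodup_add _ _ hs'
    · exact nodup_foldl_body _ _ (fun s'' x'' hs'' => PySem.Set.nodup_add _ _ hs'') _ hs'
  · apply nodup_foldl_body _ _ (fun s x hs => ?_) _ (by simp [PySem.Set.empty])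
    apply nodup_foldl_fst _ _ (fun p x hp => ?_) _
      (nodup_foldl_body _ _ (fun s' x' hs' => PySem.Set.nodup_add _ _ hs') _ hs)
    simp only []
    split
    · exact PySem.Set.nodup_update _ _ hp
    · exact hp
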